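-- pv_equiv track=rewrite | github.com/pypi-data/pypi-mirror-171 | packages/iterkit/iterkit-1.0.3.tar.gz/iterkit-1.0.3/src/iterkit/__init__.py | __iter_bigrams
-- ===== SOURCE A (Python) =====
-- def __iter_bigrams(__iterator):
--     __iterator = iter(__iterator)
--     try:
--         lhs = next(__iterator)
--     except StopIteration:
--         return
--     for rhs in __iterator:
--         yield (lhs, rhs)
--         lhs = rhs
--
--     yield (lhs, None)
-- ===== SOURCE B (Python) =====
-- def __iter_bigrams(__iterator):
--     xs = list(__iterator)
--     n = len(xs)
--     return [(xs[i], xs[i + 1] if i + 1 < n else None) for i in range(n)]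
-- ===== Notes on version B (the rewrite author's own statement) =====
-- stated objective: alternative
-- what changed: Replaced the streaming generator that carries the previous element across a loop with a two-stage version: materialize the input into a list, then build all pairs by random-access indexing in a comprehension over range(len); the last pair's None comes from the index bound, not from post-loop state.
import Mathlib
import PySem

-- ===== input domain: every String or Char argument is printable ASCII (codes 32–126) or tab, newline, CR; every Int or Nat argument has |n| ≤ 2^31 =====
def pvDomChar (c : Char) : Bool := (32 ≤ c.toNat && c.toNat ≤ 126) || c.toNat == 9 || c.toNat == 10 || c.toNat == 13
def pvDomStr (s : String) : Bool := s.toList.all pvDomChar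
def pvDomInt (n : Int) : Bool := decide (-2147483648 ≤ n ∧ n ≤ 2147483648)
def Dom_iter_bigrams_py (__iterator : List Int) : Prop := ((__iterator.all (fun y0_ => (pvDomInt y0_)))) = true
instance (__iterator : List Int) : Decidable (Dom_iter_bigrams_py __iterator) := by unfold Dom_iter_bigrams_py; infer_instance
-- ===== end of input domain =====

-- B builds the pairs by random-access indexing over a materialized list instead of A's
-- streaming loop carrying the previous element; equivalence is about the returned sequence
-- of pairs (A yields lazily, B returns a list).

-- ===== PORT A =====
-- A: take the first element, then loop over the rest yielding (lhs, rhs) and shifting lhs; final (lhs, None).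
def pvLoopA (lhs : Int) : List Int → List (Int × Option Int)
  | [] => [(lhs, none)]
  | rhs :: rest => (lhs, some rhs) :: pvLoopA rhs rest

def iter_bigrams_py (__iterator : List Int) : List (Int × Option Int) :=
  match __iterator with
  | [] => []
  | lhs :: rest => pvLoopA lhs rest

-- ===== PORT B =====
-- B: materialize, then index: [(xs[i], xs[i+1] if i+1 < n else None) for i in range(n)].
def iter_bigrams_py_alt (__iterator : List Int) : List (Int × Option Int) :=
  (PySem.List.pyRange 0 (__iterator.length : Int) 1).map (fun i =>
    (PySem.List.pyGetD __iterator i 0,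
     if i + 1 < (__iterator.length : Int) then some (PySem.List.pyGetD __iterator (i + 1) 0) else none))

-- ===== PRECONDITION & SPEC =====
def Spec_iter_bigrams_py (__iterator : List Int) (out : List (Int × Option Int)) : Prop := out = iter_bigrams_py_alt __iterator
instance (__iterator : List Int) (out : List (Int × Option Int)) : Decidable (Spec_iter_bigrams_py __iterator out) := by unfold Spec_iter_bigrams_py; infer_instance

-- ===== CLAIM =====
def Claim_equal_iter_bigrams_py : Prop := ∀ (__iterator : List Int), Dom_iter_bigrams_py __iterator → Spec_iter_bigrams_py __iterator (iter_bigrams_py __iterator)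

-- ===== LEMMAS AND PROOFS =====
lemma pvLoopA_eq (lhs : Int) (rest : List Int) :
    pvLoopA lhs rest = (lhs :: rest).zip ((rest.map Option.some) ++ [none]) := by
  induction rest generalizing lhs with
  | nil => simp [pvLoopA]
  | cons r rs ih => simp [pvLoopA, ih r]

lemma alt_eq_zip (xs : List Int) :
    iter_bigrams_py_alt xs = xs.zip (((xs.drop 1).map Option.some) ++ [none]) := by
  unfold iter_bigrams_py_alt
  apply List.ext_getElem?
  intro k
  rw [PySem.List.pyRange_one]
  simp only [Int.sub_zero, Int.toNat_natCast, List.map_map]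
  rcases Nat.lt_or_ge k xs.length with hk | hk
  · rw [List.getElem?_map, List.getElem?_range hk]
    have hzlen : k < (xs.zip (((xs.drop 1).map Option.some) ++ [none])).length := by
      simp; omega
    rw [List.getElem?_eq_getElem hzlen, List.getElem_zip]
    have hval : PySem.List.pyGetD xs ((0 : Int) + k) 0 = xs[k] := by
      simp [List.getD, List.getElem?_eq_getElem hk]
    rcases Nat.lt_or_ge (k + 1) xs.length with h | h
    · have hcond : (0 : Int) + k + 1 < (xs.length : Int) := by omega
      have hval2 : PySem.List.pyGetD xs ((0 : Int) + k + 1) 0 = xs[k + 1] := by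
        have h' : ((0 : Int) + k + 1) = ((k + 1 : Nat) : Int) := by push_cast; ring
        rw [h', PySem.List.pyGetD_natCast]
        simp [List.getD, List.getElem?_eq_getElem h]
      have hk' : k < ((xs.drop 1).map Option.some).length := by simp; omega
      have hsec : (((xs.drop 1).map Option.some) ++ [(none : Option Int)])[k]'
          (by simp; omega) = some xs[k + 1] := by
        rw [List.getElem_append_left hk', List.getElem_map, List.getElem_drop]
        simp [Nat.add_comm]
      simp only [Option.map_some, Function.comp_apply, hval, hval2, if_pos hcond, hsec]
    · have hk1 : k + 1 = xs.length := by omega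
      have hcond : ¬ ((0 : Int) + k + 1 < (xs.length : Int)) := by omega
      have hsec : (((xs.drop 1).map Option.some) ++ [(none : Option Int)])[k]'
          (by simp; omega) = (none : Option Int) := by
        rw [List.getElem_append_right (by simp; omega)]
        simp
      simp only [Option.map_some, Function.comp_apply, hval, if_neg hcond, hsec]
  · rw [List.getElem?_map]
    have h1 : (List.range xs.length)[k]? = none := by
      simp; omega
    have h2 : (xs.zip (((xs.drop 1).map Option.some) ++ [none]))[k]? = none := by
      simp; omega
    rw [h1, h2]
    rfl

-- ===== VERDICT =====
theorem iter_bigrams_py_spec : Claim_equal_iter_bigrams_py := by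
  intro l _
  unfold Spec_iter_bigrams_py iter_bigrams_py
  rw [alt_eq_zip]
  cases l with
  | nil => simp
  | cons a rest => simp [pvLoopA_eq a rest]
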